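-- pv_equiv track=rewrite | github.com/george-bobby/app-opencats | src/apps/gitlab/core/comprehensive_importer.py | _find_matching_github_issue
-- ===== SOURCE A (Python) =====
-- def _find_matching_github_issue(gitlab_issue, github_issues):
--     """Find matching GitHub issue based on title and content"""
--     gitlab_title = gitlab_issue.get("title", "").strip()
--     if not gitlab_title:
--         return None
--
--     # Try exact title match first
--     for gh_issue in github_issues:
--         if gh_issue.get("title", "").strip() == gitlab_title:
--             return gh_issue
--
--     # Try partial title match
--     for gh_issue in github_issues:
--         gh_title = gh_issue.get("title", "").strip()
--         if gitlab_title in gh_title or gh_title in gitlab_title: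
--             return gh_issue
--
--     return None
-- ===== SOURCE B (Python) =====
-- def _find_matching_github_issue(gitlab_issue, github_issues):
--     """Rank-and-select: collect every matching issue once with a rank
--     (0 = exact title match, 1 = partial) and its position, then return the
--     candidate minimal under (rank, position)."""
--     gitlab_title = gitlab_issue.get("title", "").strip()
--     if not gitlab_title:
--         return None
--     candidates = []
--     for idx, gh_issue in enumerate(github_issues):
--         gh_title = gh_issue.get("title", "").strip()
--         if gh_title == gitlab_title:
--             candidates.append((0, idx, gh_issue))
--         elif gitlab_title in gh_title or gh_title in gitlab_title:
--             candidates.append((1, idx, gh_issue))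
--     if not candidates:
--         return None
--     return min(candidates, key=lambda c: (c[0], c[1]))[2]
-- ===== Notes on version B (the rewrite author's own statement) =====
-- stated objective: alternative
-- what changed: Replaced A's two sequential scans (exact pass then partial pass) by a rank-and-select scheme: one enumeration collects every match as a (rank, index, issue) candidate (rank 0 exact, rank 1 partial) and the result is the minimum candidate under (rank, index).
import Mathlib
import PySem

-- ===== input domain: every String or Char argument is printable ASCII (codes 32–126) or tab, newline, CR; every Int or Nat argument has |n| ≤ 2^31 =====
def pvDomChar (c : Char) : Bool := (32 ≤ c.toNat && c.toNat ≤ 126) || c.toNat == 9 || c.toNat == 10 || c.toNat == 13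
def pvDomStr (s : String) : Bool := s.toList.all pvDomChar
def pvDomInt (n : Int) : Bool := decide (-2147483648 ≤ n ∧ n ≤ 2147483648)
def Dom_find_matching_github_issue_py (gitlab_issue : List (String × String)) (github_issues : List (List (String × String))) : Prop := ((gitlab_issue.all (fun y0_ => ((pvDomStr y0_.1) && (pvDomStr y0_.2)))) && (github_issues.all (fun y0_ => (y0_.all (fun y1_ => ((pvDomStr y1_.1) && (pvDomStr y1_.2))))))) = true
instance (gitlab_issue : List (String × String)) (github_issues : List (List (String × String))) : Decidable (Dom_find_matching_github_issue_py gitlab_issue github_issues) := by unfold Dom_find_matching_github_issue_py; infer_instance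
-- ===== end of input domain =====

-- B replaces A's two sequential scans by rank-and-select: one enumeration collects
-- every match as a (rank, index, issue) candidate, the result is the minimal one
-- under (rank, index) (alternative algorithm, same value).

-- ===== PORT A =====
-- first loop of A: exact title match
def pvFindExact (t : String) : List (List (String × String)) → Option (List (String × String))
  | [] => none
  | g :: rest =>
      if PySem.Str.strip ((PySem.Dict.mk g).getD "title" "") == t then some g
      else pvFindExact t rest

-- second loop of A: partial title match
def pvFindPartial (t : String) : List (List (String × String)) → Option (List (String × String))
  | [] => none
  | g :: rest =>
      let gh_title := PySem.Str.strip ((PySem.Dict.mk g).getD "title" "")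
      if PySem.Str.isIn t gh_title || PySem.Str.isIn gh_title t then some g
      else pvFindPartial t rest

def find_matching_github_issue_py (gitlab_issue : List (String × String)) (github_issues : List (List (String × String))) : Option (List (String × String)) :=
  let gitlab_title := PySem.Str.strip ((PySem.Dict.mk gitlab_issue).getD "title" "")
  if gitlab_title = "" then none
  else
    match pvFindExact gitlab_title github_issues with
    | some g => some g
    | none => pvFindPartial gitlab_title github_issues

-- ===== PORT B =====
-- body of Source B's candidate-building loop: one enumerated issue → optional (rank, idx, issue)
def pvCandOf (t : String) (p : Int × List (String × String)) : Option (Int × Int × List (String × String)) :=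
  let gh_title := PySem.Str.strip ((PySem.Dict.mk p.2).getD "title" "")
  if gh_title == t then some (0, p.1, p.2)
  else if PySem.Str.isIn t gh_title || PySem.Str.isIn gh_title t then some (1, p.1, p.2)
  else none

def find_matching_github_issue_py_alt (gitlab_issue : List (String × String)) (github_issues : List (List (String × String))) : Option (List (String × String)) :=
  let gitlab_title := PySem.Str.strip ((PySem.Dict.mk gitlab_issue).getD "title" "")
  if gitlab_title = "" then none
  else
    let candidates := (PySem.List.enumerate github_issues).filterMap (pvCandOf gitlab_title)
    if candidates = [] then none
    else (PySem.List.min2? candidates (fun c => c.1) (fun c => c.2.1)).map (fun c => c.2.2)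

-- ===== PRECONDITION & SPEC =====
def Spec_find_matching_github_issue_py (gitlab_issue : List (String × String)) (github_issues : List (List (String × String))) (out : Option (List (String × String))) : Prop := out = find_matching_github_issue_py_alt gitlab_issue github_issues
instance (gitlab_issue : List (String × String)) (github_issues : List (List (String × String))) (out : Option (List (String × String))) : Decidable (Spec_find_matching_github_issue_py gitlab_issue github_issues out) := by unfold Spec_find_matching_github_issue_py; infer_instance

-- ===== CLAIM =====
def Claim_equal_find_matching_github_issue_py : Prop := ∀ (gitlab_issue : List (String × String)) (github_issues : List (List (String × String))), Dom_find_matching_github_issue_py gitlab_issue github_issues → Spec_find_matching_github_issue_py gitlab_issue github_issues (find_matching_github_issue_py gitlab_issue github_issues)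

-- ===== LEMMAS AND PROOFS =====

-- the fold step of PySem.List.min2? with keys (rank, index), named for the proofs
def pvStep (acc : Option (Int × Int × List (String × String))) (x : Int × Int × List (String × String)) : Option (Int × Int × List (String × String)) :=
  match acc with
  | none => some x
  | some m => if (decide (x.1 < m.1) || !decide (m.1 < x.1) && decide (x.2.1 < m.2.1)) = true then some x else some m

-- proof-only abbreviation of B's candidate fold
def pvRun (t : String) (xs : List (List (String × String))) (i : Int) (acc : Option (Int × Int × List (String × String))) : Option (Int × Int × List (String × String)) :=
  ((PySem.List.enumerate xs i).filterMap (pvCandOf t)).foldl pvStep acc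

theorem pvMin2_eq_pvRun (t : String) (xs : List (List (String × String))) :
    PySem.List.min2? ((PySem.List.enumerate xs).filterMap (pvCandOf t)) (fun c => c.1) (fun c => c.2.1) = pvRun t xs 0 none := by
  unfold PySem.List.min2? pvRun pvStep
  congr 1
  funext acc x
  cases acc <;> rfl

-- evaluation of the candidate map on one enumerated element
theorem pvCandOf_exact (t : String) (i : Int) (x : List (String × String))
    (h1 : (PySem.Str.strip ((PySem.Dict.mk x).getD "title" "") == t) = true) :
    pvCandOf t (i, x) = some (0, i, x) := by
  simp only [pvCandOf]; rw [if_pos h1]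

theorem pvCandOf_partial (t : String) (i : Int) (x : List (String × String))
    (h1 : ¬ (PySem.Str.strip ((PySem.Dict.mk x).getD "title" "") == t) = true)
    (h2 : (PySem.Str.isIn t (PySem.Str.strip ((PySem.Dict.mk x).getD "title" "")) || PySem.Str.isIn (PySem.Str.strip ((PySem.Dict.mk x).getD "title" "")) t) = true) :
    pvCandOf t (i, x) = some (1, i, x) := by
  simp only [pvCandOf]; rw [if_neg h1, if_pos h2]

theorem pvCandOf_none (t : String) (i : Int) (x : List (String × String))
    (h1 : ¬ (PySem.Str.strip ((PySem.Dict.mk x).getD "title" "") == t) = true)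
    (h2 : ¬ (PySem.Str.isIn t (PySem.Str.strip ((PySem.Dict.mk x).getD "title" "")) || PySem.Str.isIn (PySem.Str.strip ((PySem.Dict.mk x).getD "title" "")) t) = true) :
    pvCandOf t (i, x) = none := by
  simp only [pvCandOf]; rw [if_neg h1, if_neg h2]

-- one-step evaluation of the candidate fold
theorem pvRun_cons_exact (t : String) (x : List (String × String)) (rest : List (List (String × String))) (i : Int) (acc : Option (Int × Int × List (String × String)))
    (h1 : (PySem.Str.strip ((PySem.Dict.mk x).getD "title" "") == t) = true) :
    pvRun t (x :: rest) i acc = pvRun t rest (i + 1) (pvStep acc (0, i, x)) := by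
  unfold pvRun
  rw [PySem.List.enumerate_cons, List.filterMap_cons_some (pvCandOf_exact t i x h1), List.foldl_cons]

theorem pvRun_cons_partial (t : String) (x : List (String × String)) (rest : List (List (String × String))) (i : Int) (acc : Option (Int × Int × List (String × String)))
    (h1 : ¬ (PySem.Str.strip ((PySem.Dict.mk x).getD "title" "") == t) = true)
    (h2 : (PySem.Str.isIn t (PySem.Str.strip ((PySem.Dict.mk x).getD "title" "")) || PySem.Str.isIn (PySem.Str.strip ((PySem.Dict.mk x).getD "title" "")) t) = true) :
    pvRun t (x :: rest) i acc = pvRun t rest (i + 1) (pvStep acc (1, i, x)) := by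
  unfold pvRun
  rw [PySem.List.enumerate_cons, List.filterMap_cons_some (pvCandOf_partial t i x h1 h2), List.foldl_cons]

theorem pvRun_cons_none (t : String) (x : List (String × String)) (rest : List (List (String × String))) (i : Int) (acc : Option (Int × Int × List (String × String)))
    (h1 : ¬ (PySem.Str.strip ((PySem.Dict.mk x).getD "title" "") == t) = true)
    (h2 : ¬ (PySem.Str.isIn t (PySem.Str.strip ((PySem.Dict.mk x).getD "title" "")) || PySem.Str.isIn (PySem.Str.strip ((PySem.Dict.mk x).getD "title" "")) t) = true) :
    pvRun t (x :: rest) i acc = pvRun t rest (i + 1) acc := by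
  unfold pvRun
  rw [PySem.List.enumerate_cons, List.filterMap_cons_none (pvCandOf_none t i x h1 h2)]

-- one-step evaluation of A's two loops
theorem pvFindExact_cons_pos (t : String) (x : List (String × String)) (rest : List (List (String × String)))
    (h1 : (PySem.Str.strip ((PySem.Dict.mk x).getD "title" "") == t) = true) :
    pvFindExact t (x :: rest) = some x := by
  simp only [pvFindExact]; rw [if_pos h1]

theorem pvFindExact_cons_neg (t : String) (x : List (String × String)) (rest : List (List (String × String)))
    (h1 : ¬ (PySem.Str.strip ((PySem.Dict.mk x).getD "title" "") == t) = true) :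
    pvFindExact t (x :: rest) = pvFindExact t rest := by
  simp only [pvFindExact]; rw [if_neg h1]

theorem pvFindPartial_cons_pos (t : String) (x : List (String × String)) (rest : List (List (String × String)))
    (h2 : (PySem.Str.isIn t (PySem.Str.strip ((PySem.Dict.mk x).getD "title" "")) || PySem.Str.isIn (PySem.Str.strip ((PySem.Dict.mk x).getD "title" "")) t) = true) :
    pvFindPartial t (x :: rest) = some x := by
  simp only [pvFindPartial]; rw [if_pos h2]

theorem pvFindPartial_cons_neg (t : String) (x : List (String × String)) (rest : List (List (String × String)))
    (h2 : ¬ (PySem.Str.isIn t (PySem.Str.strip ((PySem.Dict.mk x).getD "title" "")) || PySem.Str.isIn (PySem.Str.strip ((PySem.Dict.mk x).getD "title" "")) t) = true) :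
    pvFindPartial t (x :: rest) = pvFindPartial t rest := by
  simp only [pvFindPartial]; rw [if_neg h2]

-- step evaluations
theorem pvStep_exact_wins (i : Int) (x : List (String × String)) (m : Int × Int × List (String × String))
    (hm1 : m.1 = 1) : pvStep (some m) (0, i, x) = some (0, i, x) := by
  have hc : (decide (((0 : Int), i, x).1 < m.1) || !decide (m.1 < ((0 : Int), i, x).1) && decide (((0 : Int), i, x).2.1 < m.2.1)) = true := by
    simp [hm1]
  simp only [pvStep]; rw [hc]; simp

theorem pvStep_keep (i : Int) (r : Int) (x : List (String × String)) (m : Int × Int × List (String × String))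
    (hr : m.1 ≤ r) (hi : m.2.1 < i) : pvStep (some m) (r, i, x) = some m := by
  have hc : (decide ((r, i, x).1 < m.1) || !decide (m.1 < (r, i, x).1) && decide ((r, i, x).2.1 < m.2.1)) = false := by
    simp; omega
  simp only [pvStep]; rw [hc]; simp

-- once an exact (rank-0) candidate with a smaller index is held, it is never replaced
theorem pvFold_absorb (t : String) :
    ∀ (xs : List (List (String × String))) (i : Int) (m : Int × Int × List (String × String)),
      m.1 = 0 → m.2.1 < i → pvRun t xs i (some m) = some m := by
  intro xs
  induction xs with
  | nil => intro i m _ _; rfl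
  | cons x rest ih =>
      intro i m hm0 hmi
      by_cases h1 : (PySem.Str.strip ((PySem.Dict.mk x).getD "title" "") == t) = true
      · rw [pvRun_cons_exact t x rest i (some m) h1, pvStep_keep i 0 x m (by omega) hmi]
        exact ih (i + 1) m hm0 (by omega)
      · by_cases h2 : (PySem.Str.isIn t (PySem.Str.strip ((PySem.Dict.mk x).getD "title" "")) || PySem.Str.isIn (PySem.Str.strip ((PySem.Dict.mk x).getD "title" "")) t) = true
        · rw [pvRun_cons_partial t x rest i (some m) h1 h2, pvStep_keep i 1 x m (by omega) hmi]
          exact ih (i + 1) m hm0 (by omega)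
        · rw [pvRun_cons_none t x rest i (some m) h1 h2]
          exact ih (i + 1) m hm0 (by omega)

-- main invariant: the candidate fold realises "first exact, else held partial, else first partial"
theorem pvFold_main (t : String) :
    ∀ (xs : List (List (String × String))) (i : Int)
      (acc : Option (Int × Int × List (String × String))),
      (acc = none ∨ ∃ m, acc = some m ∧ m.1 = 1 ∧ m.2.1 < i) →
      (∃ g j, pvFindExact t xs = some g ∧ pvRun t xs i acc = some (0, j, g))
      ∨ (pvFindExact t xs = none ∧
          match acc with
          | some m => pvRun t xs i acc = some m
          | none =>
              (pvFindPartial t xs = none ∧ pvRun t xs i acc = none)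
              ∨ ∃ g j, pvFindPartial t xs = some g ∧ pvRun t xs i acc = some (1, j, g)) := by
  intro xs
  induction xs with
  | nil =>
      intro i acc hacc
      rcases hacc with h | ⟨m, hm, _, _⟩
      · subst h; right; exact ⟨rfl, Or.inl ⟨rfl, rfl⟩⟩
      · subst hm; right; exact ⟨rfl, rfl⟩
  | cons x rest ih =>
      intro i acc hacc
      by_cases h1 : (PySem.Str.strip ((PySem.Dict.mk x).getD "title" "") == t) = true
      · -- exact match at position i: the fold takes (0,i,x) and keeps it
        rw [pvRun_cons_exact t x rest i acc h1]
        have hstep : pvStep acc (0, i, x) = some (0, i, x) := by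
          rcases hacc with h | ⟨m, hm, hm1, hmi⟩
          · subst h; rfl
          · subst hm; exact pvStep_exact_wins i x m hm1
        rw [hstep, pvFold_absorb t rest (i + 1) (0, i, x) rfl (by show i < i + 1; omega)]
        exact Or.inl ⟨x, i, pvFindExact_cons_pos t x rest h1, rfl⟩
      · by_cases h2 : (PySem.Str.isIn t (PySem.Str.strip ((PySem.Dict.mk x).getD "title" "")) || PySem.Str.isIn (PySem.Str.strip ((PySem.Dict.mk x).getD "title" "")) t) = true
        · -- partial match at position i
          rw [pvRun_cons_partial t x rest i acc h1 h2]
          rcases hacc with h | ⟨m, hm, hm1, hmi⟩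
          · -- acc was none: hold (1,i,x)
            subst h
            rw [show pvStep none (1, i, x) = some (1, i, x) from rfl]
            rcases ih (i + 1) (some (1, i, x)) (Or.inr ⟨(1, i, x), rfl, rfl, by show i < i + 1; omega⟩) with
              ⟨g, j, hg, hf⟩ | ⟨hne, hf⟩
            · exact Or.inl ⟨g, j, by rw [pvFindExact_cons_neg t x rest h1]; exact hg, hf⟩
            · right
              refine ⟨by rw [pvFindExact_cons_neg t x rest h1]; exact hne, ?_⟩
              exact Or.inr ⟨x, i, pvFindPartial_cons_pos t x rest h2, by simpa using hf⟩
          · -- acc held an earlier partial: keep it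
            subst hm
            rw [pvStep_keep i 1 x m (by omega) hmi]
            rcases ih (i + 1) (some m) (Or.inr ⟨m, rfl, hm1, by omega⟩) with
              ⟨g, j, hg, hf⟩ | ⟨hne, hf⟩
            · exact Or.inl ⟨g, j, by rw [pvFindExact_cons_neg t x rest h1]; exact hg, hf⟩
            · right
              exact ⟨by rw [pvFindExact_cons_neg t x rest h1]; exact hne, by simpa using hf⟩
        · -- no match at position i
          rw [pvRun_cons_none t x rest i acc h1 h2]
          have hacc' : acc = none ∨ ∃ m, acc = some m ∧ m.1 = 1 ∧ m.2.1 < i + 1 := by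
            rcases hacc with h | ⟨m, hm, hm1, hmi⟩
            · exact Or.inl h
            · exact Or.inr ⟨m, hm, hm1, by omega⟩
          rcases ih (i + 1) acc hacc' with ⟨g, j, hg, hf⟩ | ⟨hne, hf⟩
          · exact Or.inl ⟨g, j, by rw [pvFindExact_cons_neg t x rest h1]; exact hg, hf⟩
          · right
            refine ⟨by rw [pvFindExact_cons_neg t x rest h1]; exact hne, ?_⟩
            rcases hacc with h | ⟨m, hm, _, _⟩
            · subst h
              rcases hf with ⟨hp, hf⟩ | ⟨g, j, hp, hf⟩
              · exact Or.inl ⟨by rw [pvFindPartial_cons_neg t x rest h2]; exact hp, hf⟩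
              · exact Or.inr ⟨g, j, by rw [pvFindPartial_cons_neg t x rest h2]; exact hp, hf⟩
            · subst hm; exact hf

-- ===== VERDICT =====
theorem find_matching_github_issue_py_spec : Claim_equal_find_matching_github_issue_py := by
  intro gl ghs _
  unfold Spec_find_matching_github_issue_py find_matching_github_issue_py find_matching_github_issue_py_alt
  by_cases ht : PySem.Str.strip ((PySem.Dict.mk gl).getD "title" "") = ""
  · rw [if_pos ht, if_pos ht]
  · rw [if_neg ht, if_neg ht]
    have hmin : (if ((PySem.List.enumerate ghs).filterMap (pvCandOf (PySem.Str.strip ((PySem.Dict.mk gl).getD "title" "")))) = [] then none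
          else (PySem.List.min2? ((PySem.List.enumerate ghs).filterMap (pvCandOf (PySem.Str.strip ((PySem.Dict.mk gl).getD "title" "")))) (fun c => c.1) (fun c => c.2.1)).map (fun c => c.2.2))
        = (pvRun (PySem.Str.strip ((PySem.Dict.mk gl).getD "title" "")) ghs 0 none).map (fun c => c.2.2) := by
      by_cases hc : ((PySem.List.enumerate ghs).filterMap (pvCandOf (PySem.Str.strip ((PySem.Dict.mk gl).getD "title" "")))) = []
      · rw [if_pos hc, show pvRun (PySem.Str.strip ((PySem.Dict.mk gl).getD "title" "")) ghs 0 none = ((PySem.List.enumerate ghs).filterMap (pvCandOf (PySem.Str.strip ((PySem.Dict.mk gl).getD "title" "")))).foldl pvStep none from rfl, hc]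
        rfl
      · rw [if_neg hc, pvMin2_eq_pvRun]
    rw [hmin]
    rcases pvFold_main (PySem.Str.strip ((PySem.Dict.mk gl).getD "title" "")) ghs 0 none (Or.inl rfl) with
      ⟨g, j, hg, hf⟩ | ⟨hne, hacc⟩
    · rw [hg, hf]; rfl
    · rw [hne]
      rcases hacc with ⟨hp, hf⟩ | ⟨g, j, hp, hf⟩
      · rw [hp, hf]; rfl
      · rw [hp, hf]; rfl
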